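-- pv_equiv track=rewrite | github.com/lyh951212/algorithm | est/1.py | solution
-- ===== SOURCE A (Python) =====
-- from functools import reduce
--
-- def solution(histogram):
--     answer = 0
--     r = len(histogram)
--     c = len(histogram[0])
--
--     cols = [[] for i in range(c)]
--     for _c in range(c):
--         for _r in range(r-1,-1,-1):
--             cols[_c].append(str(histogram[_r][_c]))
--
--     res = []
--
--     for col in cols:
--         strcol = ''.join(col)
--         idx_0 = strcol.rfind('0')
--         idx_1 = strcol.rfind('1')
--         idx_2 = strcol.rfind('2')
--
--         if idx_2 == -1:
--             res.append(1)
--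
--         elif idx_1 > idx_2 or '0' in strcol[0:idx_2]:
--             res.append(1)
--
--         else:
--             res.append((idx_2+1)-idx_1)
--
--     answer = reduce(lambda x, y: x * y, res)
--
--     return answer
-- ===== SOURCE B (Python) =====
-- def solution(histogram):
--     answer = 1
--     c = len(histogram[0])
--     for j in range(c):
--         S = 0
--         idx2 = -1
--         idx1 = -1
--         zb = False
--         seen0 = False
--         for row in reversed(histogram):
--             s = str(row[j])
--             q2 = s.rfind('2')
--             if q2 != -1:
--                 idx2 = S + q2
--                 zb = seen0 or ('0' in s[:q2])
--             q1 = s.rfind('1')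
--             if q1 != -1:
--                 idx1 = S + q1
--             if '0' in s:
--                 seen0 = True
--             S += len(s)
--         if idx2 == -1:
--             factor = 1
--         elif idx1 > idx2 or zb:
--             factor = 1
--         else:
--             factor = idx2 + 1 - idx1
--         answer *= factor
--     return answer
-- ===== Notes on version B (the rewrite author's own statement) =====
-- stated objective: alternative
-- what changed: Instead of materializing each column as a reversed joined string and rescanning it with three rfind calls, a slice substring test and a reduce, B makes one bottom-up streaming pass per column, keeping a running character offset and updating the last-seen positions of '2' and '1' and the zero-below-topmost-2 flag per cell.
import Mathlib
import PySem

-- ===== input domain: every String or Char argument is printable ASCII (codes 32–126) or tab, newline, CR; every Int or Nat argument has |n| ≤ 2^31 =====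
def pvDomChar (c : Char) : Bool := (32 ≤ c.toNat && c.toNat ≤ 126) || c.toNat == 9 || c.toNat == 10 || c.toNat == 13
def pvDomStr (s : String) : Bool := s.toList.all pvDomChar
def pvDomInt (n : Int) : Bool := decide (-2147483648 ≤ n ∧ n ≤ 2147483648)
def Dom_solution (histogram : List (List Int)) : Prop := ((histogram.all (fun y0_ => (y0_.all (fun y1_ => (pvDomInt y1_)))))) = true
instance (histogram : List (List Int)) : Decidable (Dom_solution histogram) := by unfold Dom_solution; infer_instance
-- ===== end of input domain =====

-- B replaces A's per-column reversed-string build + three whole-column rfind calls + slice scan + reduce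
-- by a single bottom-up streaming pass per column with a running character offset; objective: alternative.

-- ===== PORT A =====
def solution (histogram : List (List Int)) : Int :=
  let r : Int := (histogram.length : Int)
  let c : Int := ((PySem.List.pyGetD histogram 0 []).length : Int)
  let cols : List (List String) :=
    (PySem.List.pyRange 0 c 1).map (fun _c =>
      (PySem.List.pyRange (r - 1) (-1) (-1)).map (fun _r =>
        PySem.Int.toStr (PySem.List.pyGetD (PySem.List.pyGetD histogram _r []) _c 0)))
  let res : List Int := cols.map (fun col =>
    let strcol := PySem.Str.join "" col
    let _idx_0 := PySem.Str.rfind strcol "0"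
    let idx_1 := PySem.Str.rfind strcol "1"
    let idx_2 := PySem.Str.rfind strcol "2"
    if idx_2 = -1 then 1
    else if idx_1 > idx_2 ∨ PySem.Str.isIn "0" (PySem.Str.slice strcol (some 0) (some idx_2)) then 1
    else (idx_2 + 1) - idx_1)
  -- reduce(mul, res) raises TypeError on an empty res; that case is excluded by Pre_solution
  match res with
  | [] => 0
  | h :: t => t.foldl (· * ·) h

-- ===== PORT B =====
-- state: (S, idx2, idx1, zb, seen0), exactly Source B's five loop variables
def solution_alt (histogram : List (List Int)) : Int :=
  let c : Int := ((PySem.List.pyGetD histogram 0 []).length : Int)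
  (PySem.List.pyRange 0 c 1).foldl (fun answer j =>
    let st : Int × Int × Int × Bool × Bool :=
      histogram.reverse.foldl (fun (st : Int × Int × Int × Bool × Bool) row =>
        let s := PySem.Int.toStr (PySem.List.pyGetD row j 0)
        let q2 := PySem.Str.rfind s "2"
        let idx2 := if q2 ≠ -1 then st.1 + q2 else st.2.1
        let zb := if q2 ≠ -1 then (st.2.2.2.2 || PySem.Str.isIn "0" (PySem.Str.slice s none (some q2)))
                  else st.2.2.2.1
        let q1 := PySem.Str.rfind s "1"
        let idx1 := if q1 ≠ -1 then st.1 + q1 else st.2.2.1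
        let seen0 := st.2.2.2.2 || PySem.Str.isIn "0" s
        (st.1 + PySem.Str.len s, idx2, idx1, zb, seen0))
        ((0 : Int), (-1 : Int), (-1 : Int), false, false)
    let factor : Int :=
      if st.2.1 = -1 then 1
      else if st.2.2.1 > st.2.1 ∨ st.2.2.2.1 = true then 1
      else st.2.1 + 1 - st.2.2.1
    answer * factor) 1

-- ===== PRECONDITION & SPEC =====
-- Pre_ excludes exactly the inputs where A raises: the empty grid (IndexError on histogram[0]),
-- a grid whose first row is empty (TypeError: reduce of an empty list), and grids with a later row
-- shorter than the first (IndexError in the column loop).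
def Pre_solution (histogram : List (List Int)) : Prop :=
  histogram ≠ [] ∧ 0 < (histogram.headD []).length ∧
  ∀ row ∈ histogram, (histogram.headD []).length ≤ row.length
instance (histogram : List (List Int)) : Decidable (Pre_solution histogram) := by
  unfold Pre_solution; infer_instance
def pvWitness_solution : List (List Int) := [[2, 0], [1, 2]]

def Spec_solution (histogram : List (List Int)) (out : Int) : Prop := out = solution_alt histogram
instance (histogram : List (List Int)) (out : Int) : Decidable (Spec_solution histogram out) := by unfold Spec_solution; infer_instance

-- ===== CLAIM (what is proved, stated in full; the proofs are below) =====
def Claim_equal_solution : Prop := ∀ (histogram : List (List Int)), Dom_solution histogram → Pre_solution histogram → Spec_solution histogram (solution histogram)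

-- ===== LEMMAS AND PROOFS =====

lemma go_zero (s sub : List Char) :
    PySem.Chars.rfind.go s sub 0 = if sub.isPrefixOf s then 0 else -1 := rfl

lemma go_succ (s sub : List Char) (j : Nat) :
    PySem.Chars.rfind.go s sub (j + 1)
      = if sub.isPrefixOf (s.drop (j + 1)) then ((j : Int) + 1) else PySem.Chars.rfind.go s sub j := by
  rfl

lemma rfind_nil (c : Char) : PySem.Chars.rfind [] [c] = -1 := by
  unfold PySem.Chars.rfind
  simp [go_zero, List.isPrefixOf]

lemma rfind_go_append (cs : List Char) (a c : Char) (hne : a ≠ c) :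
    ∀ j, j ≤ cs.length →
      PySem.Chars.rfind.go (cs ++ [a]) [c] j = PySem.Chars.rfind.go cs [c] j := by
  intro j
  induction j with
  | zero =>
    intro _
    cases cs with
    | nil => simp [go_zero, List.isPrefixOf, Ne.symm hne]
    | cons b bs => simp [go_zero, List.isPrefixOf]
  | succ j ih =>
    intro hj
    have hj' : j ≤ cs.length := by omega
    have hdrop : (cs ++ [a]).drop (j + 1) = cs.drop (j + 1) ++ [a] :=
      List.drop_append_of_le_length hj
    have hcond : ([c].isPrefixOf (cs.drop (j + 1) ++ [a])) = ([c].isPrefixOf (cs.drop (j + 1))) := by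
      cases h : cs.drop (j + 1) with
      | nil => simp [List.isPrefixOf, Ne.symm hne]
      | cons b bs => simp [List.isPrefixOf]
    rw [go_succ, go_succ, hdrop, hcond, ih hj']

lemma rfind_snoc (cs : List Char) (a c : Char) :
    PySem.Chars.rfind (cs ++ [a]) [c] =
      if a = c then (cs.length : Int) else PySem.Chars.rfind cs [c] := by
  unfold PySem.Chars.rfind
  have hlen : (cs ++ [a]).length = cs.length + 1 := by simp
  rw [hlen, go_succ]
  have hdrop1 : (cs ++ [a]).drop (cs.length + 1) = [] := by simp
  rw [hdrop1]
  simp only [List.isPrefixOf]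
  by_cases hac : a = c
  · subst hac
    rw [if_pos rfl]
    cases hn : cs.length with
    | zero =>
      have : cs = [] := List.eq_nil_of_length_eq_zero hn
      subst this
      simp [go_zero, List.isPrefixOf]
    | succ m =>
      rw [go_succ]
      have : (cs ++ [a]).drop (m + 1) = [a] := by rw [← hn]; simp
      rw [this]
      simp [List.isPrefixOf]
  · rw [if_neg hac]
    exact rfind_go_append cs a c hac cs.length le_rfl

lemma rfind_lb (cs : List Char) (c : Char) : -1 ≤ PySem.Chars.rfind cs [c] := by
  induction cs using List.reverseRecOn with
  | nil => rw [rfind_nil]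
  | append_singleton cs a ih =>
    rw [rfind_snoc]
    by_cases hac : a = c
    · rw [if_pos hac]; omega
    · rw [if_neg hac]; exact ih

lemma rfind_ub (cs : List Char) (c : Char) : PySem.Chars.rfind cs [c] < (cs.length : Int) := by
  induction cs using List.reverseRecOn with
  | nil => rw [rfind_nil]; simp
  | append_singleton cs a ih =>
    rw [rfind_snoc]
    by_cases hac : a = c
    · rw [if_pos hac]; simp
    · rw [if_neg hac]; simp; omega

lemma rfind_append (xs ys : List Char) (c : Char) :
    PySem.Chars.rfind (xs ++ ys) [c]
      = if PySem.Chars.rfind ys [c] = -1 then PySem.Chars.rfind xs [c]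
        else (xs.length : Int) + PySem.Chars.rfind ys [c] := by
  induction ys using List.reverseRecOn with
  | nil => simp [rfind_nil]
  | append_singleton ys a ih =>
    rw [← List.append_assoc, rfind_snoc, rfind_snoc]
    by_cases hac : a = c
    · rw [if_pos hac, if_pos hac]
      have h2 : ¬ ((ys.length : Int) = -1) := by omega
      rw [if_neg h2]
      simp
    · rw [if_neg hac, if_neg hac, ih]

-- ''.join of arbitrary parts is flatten
lemma join_nil_flatten (parts : List (List Char)) :
    PySem.Chars.join [] parts = parts.flatten := by
  induction parts with
  | nil => simp [PySem.Chars.join_nil]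
  | cons p ps ih =>
    cases ps with
    | nil => simp [PySem.Chars.join_singleton]
    | cons q rest =>
      rw [PySem.Chars.join_cons_cons, List.flatten_cons, ih]
      simp

lemma strcol_toList (ls : List Int) :
    (PySem.Str.join "" (ls.map PySem.Int.toStr)).toList
      = (ls.map PySem.Int.toChars).flatten := by
  rw [PySem.Str.toList_join]
  have h1 : (ls.map PySem.Int.toStr).map String.toList = ls.map PySem.Int.toChars := by
    rw [List.map_map]
    exact List.map_congr_left (fun v _ => PySem.Int.toList_toStr v)
  rw [h1]
  exact join_nil_flatten _

-- the column character stream read bottom-to-top, as B scans it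
def colCS (j : Int) (ls : List (List Int)) : List Char :=
  (ls.map (fun row => PySem.Int.toChars (PySem.List.pyGetD row j 0))).flatten

-- B's five loop variables after scanning ls are exactly A's quantities on the scanned stream
lemma scan_inv (j : Int) (ls : List (List Int)) :
    ls.foldl (fun (st : Int × Int × Int × Bool × Bool) row =>
        let s := PySem.Int.toStr (PySem.List.pyGetD row j 0)
        let q2 := PySem.Str.rfind s "2"
        let idx2 := if q2 ≠ -1 then st.1 + q2 else st.2.1
        let zb := if q2 ≠ -1 then (st.2.2.2.2 || PySem.Str.isIn "0" (PySem.Str.slice s none (some q2)))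
                  else st.2.2.2.1
        let q1 := PySem.Str.rfind s "1"
        let idx1 := if q1 ≠ -1 then st.1 + q1 else st.2.2.1
        let seen0 := st.2.2.2.2 || PySem.Str.isIn "0" s
        (st.1 + PySem.Str.len s, idx2, idx1, zb, seen0))
      ((0 : Int), (-1 : Int), (-1 : Int), false, false)
    = (((colCS j ls).length : Int),
       PySem.Chars.rfind (colCS j ls) ['2'],
       PySem.Chars.rfind (colCS j ls) ['1'],
       decide ('0' ∈ (colCS j ls).take (PySem.Chars.rfind (colCS j ls) ['2']).toNat),
       decide ('0' ∈ colCS j ls)) := by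
  induction ls using List.reverseRecOn with
  | nil => simp [colCS, rfind_nil]
  | append_singleton ls row ih =>
    rw [List.foldl_append, ih]
    simp only [List.foldl_cons, List.foldl_nil]
    have hcs : colCS j (ls ++ [row]) = colCS j ls ++ PySem.Int.toChars (PySem.List.pyGetD row j 0) := by
      simp [colCS]
    rw [hcs]
    simp only [PySem.Str.rfind_eq, PySem.Str.isIn_eq, PySem.Str.toList_slice, PySem.Str.len_eq,
      PySem.Int.toList_toStr, PySem.Chars.slice]
    rw [show ("2" : String).toList = ['2'] from rfl, show ("1" : String).toList = ['1'] from rfl,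
      show ("0" : String).toList = ['0'] from rfl]
    generalize PySem.Int.toChars (PySem.List.pyGetD row j 0) = b
    generalize colCS j ls = cs
    have hra2 := rfind_append cs b '2'
    have hra1 := rfind_append cs b '1'
    have hlb2 := rfind_lb b '2'
    have hub2 := rfind_ub cs '2'
    have hlbcs2 := rfind_lb cs '2'
    have hinb : PySem.Chars.isIn ['0'] b = decide ('0' ∈ b) := by
      cases h : PySem.Chars.isIn ['0'] b
      · have := PySem.Chars.isIn_eq_false_iff ['0'] b |>.mp h
        rw [List.singleton_infix_iff] at this
        simp [this]
      · have := PySem.Chars.isIn_iff_infix ['0'] b |>.mp h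
        rw [List.singleton_infix_iff] at this
        simp [this]
    by_cases h2 : PySem.Chars.rfind b ['2'] = -1
    · -- no '2' in this (topmost-so-far) row: idx2, zb unchanged
      have hidx : PySem.Chars.rfind (cs ++ b) ['2'] = PySem.Chars.rfind cs ['2'] := by
        rw [hra2, if_pos h2]
      have htake : (cs ++ b).take (PySem.Chars.rfind cs ['2']).toNat
          = cs.take (PySem.Chars.rfind cs ['2']).toNat := by
        apply List.take_append_of_le_length
        omega
      by_cases h1 : PySem.Chars.rfind b ['1'] = -1
      · have hidx1 : PySem.Chars.rfind (cs ++ b) ['1'] = PySem.Chars.rfind cs ['1'] := by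
          rw [hra1, if_pos h1]
        simp [h1, h2, hidx, hidx1, htake, hinb, List.mem_append, Bool.or_comm]
      · have hidx1 : PySem.Chars.rfind (cs ++ b) ['1'] = (cs.length : Int) + PySem.Chars.rfind b ['1'] := by
          rw [hra1, if_neg h1]
        simp [h1, h2, hidx, hidx1, htake, hinb, List.mem_append, Bool.or_comm]
    · -- a '2' in this row: it becomes the topmost
      have hq2pos : 0 ≤ PySem.Chars.rfind b ['2'] := by omega
      have hidx : PySem.Chars.rfind (cs ++ b) ['2'] = (cs.length : Int) + PySem.Chars.rfind b ['2'] := by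
        rw [hra2, if_neg h2]
      have htn : ((cs.length : Int) + PySem.Chars.rfind b ['2']).toNat
          = cs.length + (PySem.Chars.rfind b ['2']).toNat := by omega
      have htake : (cs ++ b).take (cs.length + (PySem.Chars.rfind b ['2']).toNat)
          = cs ++ b.take (PySem.Chars.rfind b ['2']).toNat := by
        rw [List.take_append]
        simp
      have hzb : PySem.Chars.isIn ['0'] (PySem.List.slice b none (some (PySem.Chars.rfind b ['2'])))
          = decide ('0' ∈ b.take (PySem.Chars.rfind b ['2']).toNat) := by
        rw [PySem.List.slice_to _ hq2pos]
        cases h : PySem.Chars.isIn ['0'] (b.take (PySem.Chars.rfind b ['2']).toNat)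
        · have := PySem.Chars.isIn_eq_false_iff _ _ |>.mp h
          rw [List.singleton_infix_iff] at this
          simp [this]
        · have := PySem.Chars.isIn_iff_infix _ _ |>.mp h
          rw [List.singleton_infix_iff] at this
          simp [this]
      by_cases h1 : PySem.Chars.rfind b ['1'] = -1
      · have hidx1 : PySem.Chars.rfind (cs ++ b) ['1'] = PySem.Chars.rfind cs ['1'] := by
          rw [hra1, if_pos h1]
        simp [h1, h2, hidx, hidx1, htn, htake, hzb, hinb, List.mem_append, Bool.or_comm]
      · have hidx1 : PySem.Chars.rfind (cs ++ b) ['1'] = (cs.length : Int) + PySem.Chars.rfind b ['1'] := by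
          rw [hra1, if_neg h1]
        simp [h1, h2, hidx, hidx1, htn, htake, hzb, hinb, List.mem_append, Bool.or_comm]

lemma colA_eq (hist : List (List Int)) (j : Int) :
    (PySem.List.pyRange ((hist.length : Int) - 1) (-1) (-1)).map
        (fun _r => PySem.Int.toStr (PySem.List.pyGetD (PySem.List.pyGetD hist _r []) j 0))
      = ((hist.map (fun row => PySem.List.pyGetD row j 0)).reverse).map PySem.Int.toStr := by
  rw [PySem.List.pyRange_neg_one_eq_reverse]
  norm_num
  rw [show (fun _r => PySem.Int.toStr (PySem.List.pyGetD (PySem.List.pyGetD hist _r []) j 0))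
        = (fun row => PySem.Int.toStr (PySem.List.pyGetD row j 0)) ∘ (fun _r => PySem.List.pyGetD hist _r []) from rfl]
  rw [← List.map_map, PySem.List.map_pyGetD_pyRange_zero']
  rfl

-- A's column string, read as a char list, is B's bottom-to-top stream
lemma strcolA_eq_colCS (hist : List (List Int)) (j : Int) :
    (PySem.Str.join "" (((hist.map (fun row => PySem.List.pyGetD row j 0)).reverse).map PySem.Int.toStr)).toList
      = colCS j hist.reverse := by
  rw [strcol_toList]
  simp [colCS, List.map_reverse, List.map_map, Function.comp_def]

lemma percol (hist : List (List Int)) (j : Int) :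
    (if PySem.Str.rfind (PySem.Str.join "" ((PySem.List.pyRange ((hist.length : Int) - 1) (-1) (-1)).map
            (fun _r => PySem.Int.toStr (PySem.List.pyGetD (PySem.List.pyGetD hist _r []) j 0)))) "2" = -1 then (1:Int)
     else if PySem.Str.rfind (PySem.Str.join "" ((PySem.List.pyRange ((hist.length : Int) - 1) (-1) (-1)).map
            (fun _r => PySem.Int.toStr (PySem.List.pyGetD (PySem.List.pyGetD hist _r []) j 0)))) "1"
            > PySem.Str.rfind (PySem.Str.join "" ((PySem.List.pyRange ((hist.length : Int) - 1) (-1) (-1)).map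
            (fun _r => PySem.Int.toStr (PySem.List.pyGetD (PySem.List.pyGetD hist _r []) j 0)))) "2"
          ∨ PySem.Str.isIn "0" (PySem.Str.slice (PySem.Str.join "" ((PySem.List.pyRange ((hist.length : Int) - 1) (-1) (-1)).map
            (fun _r => PySem.Int.toStr (PySem.List.pyGetD (PySem.List.pyGetD hist _r []) j 0)))) (some 0)
            (some (PySem.Str.rfind (PySem.Str.join "" ((PySem.List.pyRange ((hist.length : Int) - 1) (-1) (-1)).map
            (fun _r => PySem.Int.toStr (PySem.List.pyGetD (PySem.List.pyGetD hist _r []) j 0)))) "2"))) = true then 1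
     else PySem.Str.rfind (PySem.Str.join "" ((PySem.List.pyRange ((hist.length : Int) - 1) (-1) (-1)).map
            (fun _r => PySem.Int.toStr (PySem.List.pyGetD (PySem.List.pyGetD hist _r []) j 0)))) "2" + 1
          - PySem.Str.rfind (PySem.Str.join "" ((PySem.List.pyRange ((hist.length : Int) - 1) (-1) (-1)).map
            (fun _r => PySem.Int.toStr (PySem.List.pyGetD (PySem.List.pyGetD hist _r []) j 0)))) "1")
    =
    (let st : Int × Int × Int × Bool × Bool :=
      hist.reverse.foldl (fun (st : Int × Int × Int × Bool × Bool) row =>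
        let s := PySem.Int.toStr (PySem.List.pyGetD row j 0)
        let q2 := PySem.Str.rfind s "2"
        let idx2 := if q2 ≠ -1 then st.1 + q2 else st.2.1
        let zb := if q2 ≠ -1 then (st.2.2.2.2 || PySem.Str.isIn "0" (PySem.Str.slice s none (some q2)))
                  else st.2.2.2.1
        let q1 := PySem.Str.rfind s "1"
        let idx1 := if q1 ≠ -1 then st.1 + q1 else st.2.2.1
        let seen0 := st.2.2.2.2 || PySem.Str.isIn "0" s
        (st.1 + PySem.Str.len s, idx2, idx1, zb, seen0))
        ((0 : Int), (-1 : Int), (-1 : Int), false, false)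
     if st.2.1 = -1 then (1:Int)
     else if st.2.2.1 > st.2.1 ∨ st.2.2.2.1 = true then 1
     else st.2.1 + 1 - st.2.2.1) := by
  rw [colA_eq hist j, scan_inv j hist.reverse]
  have hst : (PySem.Str.join "" (((hist.map (fun row => PySem.List.pyGetD row j 0)).reverse).map PySem.Int.toStr)).toList
      = colCS j hist.reverse := strcolA_eq_colCS hist j
  set cs := colCS j hist.reverse with hcsdef
  have hr2 : PySem.Str.rfind (PySem.Str.join "" (((hist.map (fun row => PySem.List.pyGetD row j 0)).reverse).map PySem.Int.toStr)) "2"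
      = PySem.Chars.rfind cs ['2'] := by
    rw [PySem.Str.rfind_eq, hst]; rfl
  have hr1 : PySem.Str.rfind (PySem.Str.join "" (((hist.map (fun row => PySem.List.pyGetD row j 0)).reverse).map PySem.Int.toStr)) "1"
      = PySem.Chars.rfind cs ['1'] := by
    rw [PySem.Str.rfind_eq, hst]; rfl
  rw [hr1, hr2]
  by_cases h2 : PySem.Chars.rfind cs ['2'] = -1
  · rw [if_pos h2]
    simp [h2]
  · rw [if_neg h2]
    simp only [h2, if_false]
    have h2pos : 0 ≤ PySem.Chars.rfind cs ['2'] := by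
      have := rfind_lb cs '2'
      omega
    have hcond : (PySem.Str.isIn "0" (PySem.Str.slice (PySem.Str.join "" (((hist.map (fun row => PySem.List.pyGetD row j 0)).reverse).map PySem.Int.toStr)) (some 0)
          (some (PySem.Chars.rfind cs ['2']))) = true)
        ↔ (decide ('0' ∈ cs.take (PySem.Chars.rfind cs ['2']).toNat) = true) := by
      rw [PySem.Str.isIn_eq, PySem.Str.toList_slice, hst]
      show PySem.Chars.isIn _ (PySem.List.slice _ _ _) = true ↔ _
      rw [PySem.List.slice_zero_start, PySem.List.slice_to _ h2pos]
      rw [show ("0" : String).toList = ['0'] from rfl]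
      rw [PySem.Chars.isIn_iff_infix, List.singleton_infix_iff]
      simp
    exact if_congr (or_congr Iff.rfl hcond) rfl rfl

-- ===== VERDICT (by name: the statement is the Claim_ definition above) =====
set_option maxHeartbeats 1600000 in
theorem solution_spec : Claim_equal_solution := by
  intro hist hdom hpre
  unfold Spec_solution
  obtain ⟨hne, hcpos, hrows⟩ := hpre
  obtain ⟨h0, hs, rfl⟩ := List.exists_cons_of_ne_nil hne
  simp only [solution, solution_alt, PySem.List.pyGetD_zero_cons, List.headD_cons] at *
  have hc0 : (0:Int) < (h0.length : Int) := by exact_mod_cast hcpos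
  rw [List.map_map]
  have hmap :
      List.map ((fun col =>
          if PySem.Str.rfind (PySem.Str.join "" col) "2" = -1 then (1:Int)
          else if PySem.Str.rfind (PySem.Str.join "" col) "1" > PySem.Str.rfind (PySem.Str.join "" col) "2" ∨
              PySem.Str.isIn "0" (PySem.Str.slice (PySem.Str.join "" col) (some 0)
                (some (PySem.Str.rfind (PySem.Str.join "" col) "2"))) = true then 1
          else PySem.Str.rfind (PySem.Str.join "" col) "2" + 1 - PySem.Str.rfind (PySem.Str.join "" col) "1")
        ∘ (fun _c => List.map (fun _r => PySem.Int.toStr (PySem.List.pyGetD (PySem.List.pyGetD (h0 :: hs) _r []) _c 0))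
            (PySem.List.pyRange ((((h0 :: hs).length : Int)) - 1) (-1) (-1))))
        (PySem.List.pyRange 0 ((h0.length : Int)))
      = List.map (fun j =>
          let st : Int × Int × Int × Bool × Bool :=
            (h0 :: hs).reverse.foldl (fun (st : Int × Int × Int × Bool × Bool) row =>
              let s := PySem.Int.toStr (PySem.List.pyGetD row j 0)
              let q2 := PySem.Str.rfind s "2"
              let idx2 := if q2 ≠ -1 then st.1 + q2 else st.2.1
              let zb := if q2 ≠ -1 then (st.2.2.2.2 || PySem.Str.isIn "0" (PySem.Str.slice s none (some q2)))
                        else st.2.2.2.1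
              let q1 := PySem.Str.rfind s "1"
              let idx1 := if q1 ≠ -1 then st.1 + q1 else st.2.2.1
              let seen0 := st.2.2.2.2 || PySem.Str.isIn "0" s
              (st.1 + PySem.Str.len s, idx2, idx1, zb, seen0))
              ((0 : Int), (-1 : Int), (-1 : Int), false, false)
          if st.2.1 = -1 then (1:Int)
          else if st.2.2.1 > st.2.1 ∨ st.2.2.2.1 = true then 1
          else st.2.1 + 1 - st.2.2.1) (PySem.List.pyRange 0 ((h0.length : Int))) := by
    apply List.map_congr_left
    intro j _
    simp only [Function.comp_apply]
    exact percol (h0 :: hs) j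
  rw [hmap]
  rw [PySem.List.pyRange_one_cons hc0]
  simp only [List.map_cons, List.foldl_cons, one_mul]
  rw [List.foldl_map]
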